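-- pv_equiv track=rewrite | github.com/Yaroslav938/primers3 | utils.py | run_virtual_pcr
-- ===== SOURCE A (Python) =====
-- from typing import List, Optional, Tuple, Dict
--
-- def reverse_complement(seq: str) -> str:
--     complement = {"A": "T", "T": "A", "G": "C", "C": "G", "N": "N",
--                   "R": "Y", "Y": "R", "S": "S", "W": "W", "K": "M",
--                   "M": "K", "B": "V", "V": "B", "D": "H", "H": "D"}
--     return "".join(complement.get(b, "N") for b in reversed(seq.upper()))
--
-- def find_binding_sites(template: str, search_seq: str, max_mismatches: int = 2, is_reverse: bool = False) -> List[Dict]: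
--     """Ищет места посадки скользящим окном с учетом мисматчей."""
--     sites = []
--     t_len = len(template)
--     p_len = len(search_seq)
--     if t_len == 0 or p_len == 0 or t_len < p_len:
--         return sites
--
--     search_upper = search_seq.upper()
--     template_upper = template.upper()
--
--     for i in range(t_len - p_len + 1):
--         window = template_upper[i:i+p_len]
--
--         # Быстрый подсчет несовпадений
--         mismatches = sum(1 for a, b in zip(window, search_upper) if a != b)
--
--         if mismatches <= max_mismatches:
--             # Считаем мисматчи на 3'-конце праймера (последние 5 нуклеотидов).
--             # Для Forward праймера это КОНЕЦ поисковой строки.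
--             # Для Reverse праймера (ищем обратно-комплементарную) 3'-конец праймера - это НАЧАЛО поисковой строки!
--             if not is_reverse:
--                 end_mismatches = sum(1 for a, b in zip(window[-5:], search_upper[-5:]) if a != b)
--             else:
--                 end_mismatches = sum(1 for a, b in zip(window[:5], search_upper[:5]) if a != b)
--
--             sites.append({
--                 "start": i + 1,  # 1-based
--                 "end": i + p_len,
--                 "mismatches": mismatches,
--                 "3prime_mismatches": end_mismatches,
--                 "sequence": window
--             })
--     return sites
--
-- def run_virtual_pcr(template: str, fwd: str, rev: str, max_mismatches: int = 2, max_product: int = 5000) -> List[Dict]: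
--     """Запускает симуляцию ПЦР, находя продукты амплификации."""
--     template = template.upper()
--     rev_comp = reverse_complement(rev)
--
--     fwd_sites = find_binding_sites(template, fwd, max_mismatches, is_reverse=False)
--     rev_sites = find_binding_sites(template, rev_comp, max_mismatches, is_reverse=True)
--
--     products = []
--     for f in fwd_sites:
--         for r in rev_sites:
--             # Праймер Reverse должен быть ПОСЛЕ праймера Forward
--             if f["start"] < r["end"]:
--                 product_size = r["end"] - f["start"] + 1
--                 if product_size <= max_product:
--                     products.append({
--                         "fwd_start": f["start"],
--                         "fwd_end": f["end"],
--                         "rev_start": r["start"],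
--                         "rev_end": r["end"],
--                         "size": product_size,
--                         "fwd_mismatches": f["mismatches"],
--                         "rev_mismatches": r["mismatches"],
--                         "fwd_3prime_mm": f["3prime_mismatches"],
--                         "rev_3prime_mm": r["3prime_mismatches"]
--                     })
--
--     # Сортируем по размеру продукта
--     products.sort(key=lambda x: x["size"])
--     return products
-- ===== SOURCE B (Python) =====
-- from typing import List, Dict
--
-- _COMP = {"A": "T", "T": "A", "G": "C", "C": "G", "N": "N",
--          "R": "Y", "Y": "R", "S": "S", "W": "W", "K": "M",
--          "M": "K", "B": "V", "V": "B", "D": "H", "H": "D"}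
--
--
-- def reverse_complement(seq: str) -> str:
--     # map each base first, reverse once at the end
--     return "".join(_COMP.get(b, "N") for b in seq.upper())[::-1]
--
--
-- def _sites(template: str, primer: str, max_mismatches: int, is_reverse: bool):
--     """Binding sites as (start, end, mismatches, 3'-mismatches) tuples, 1-based,
--     from one per-position difference vector per window (no window slicing)."""
--     t = template.upper()
--     p = primer.upper()
--     m = len(p)
--     if m == 0 or len(t) < m:
--         return []
--     out = []
--     for i in range(len(t) - m + 1):
--         diffs = [t[i + j] != p[j] for j in range(m)]
--         d = sum(diffs)
--         if d <= max_mismatches: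
--             e = sum(diffs[:5]) if is_reverse else sum(diffs[-5:])
--             out.append((i + 1, i + m, d, e))
--     return out
--
--
-- def run_virtual_pcr(template: str, fwd: str, rev: str, max_mismatches: int = 2, max_product: int = 5000) -> List[Dict]:
--     """Counting-based windowing: rev-site ends are strictly increasing, so the rev
--     sites compatible with a fwd site form a contiguous slice, located by counting."""
--     template = template.upper()
--     fwd_sites = _sites(template, fwd, max_mismatches, False)
--     rev_sites = _sites(template, reverse_complement(rev), max_mismatches, True)
--     ends = [e for (_, e, _, _) in rev_sites]  # ascending
--
--     products = []
--     for (fs, fe, fd, f3) in fwd_sites: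
--         lo = sum(1 for e in ends if e <= fs)
--         hi = sum(1 for e in ends if e <= fs + max_product - 1)
--         for (rs, re, rd, r3) in rev_sites[lo:hi]:
--             products.append({
--                 "fwd_start": fs,
--                 "fwd_end": fe,
--                 "rev_start": rs,
--                 "rev_end": re,
--                 "size": re - fs + 1,
--                 "fwd_mismatches": fd,
--                 "rev_mismatches": rd,
--                 "fwd_3prime_mm": f3,
--                 "rev_3prime_mm": r3
--             })
--
--     products.sort(key=lambda x: x["size"])
--     return products
-- ===== Notes on version B (the rewrite author's own statement) =====
-- stated objective: alternative
-- what changed: Site search now builds one per-position boolean difference vector per window and derives total and 3'-end mismatches from its prefix/suffix instead of slicing and zipping windows, and the full fwd-sites x rev-sites nested pairing scan is replaced by counting, per fwd site, how many of the strictly increasing rev-site ends are small enough, which locates the compatible rev sites as one contiguous slice; emission order and the stable size sort are unchanged.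
import Mathlib
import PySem

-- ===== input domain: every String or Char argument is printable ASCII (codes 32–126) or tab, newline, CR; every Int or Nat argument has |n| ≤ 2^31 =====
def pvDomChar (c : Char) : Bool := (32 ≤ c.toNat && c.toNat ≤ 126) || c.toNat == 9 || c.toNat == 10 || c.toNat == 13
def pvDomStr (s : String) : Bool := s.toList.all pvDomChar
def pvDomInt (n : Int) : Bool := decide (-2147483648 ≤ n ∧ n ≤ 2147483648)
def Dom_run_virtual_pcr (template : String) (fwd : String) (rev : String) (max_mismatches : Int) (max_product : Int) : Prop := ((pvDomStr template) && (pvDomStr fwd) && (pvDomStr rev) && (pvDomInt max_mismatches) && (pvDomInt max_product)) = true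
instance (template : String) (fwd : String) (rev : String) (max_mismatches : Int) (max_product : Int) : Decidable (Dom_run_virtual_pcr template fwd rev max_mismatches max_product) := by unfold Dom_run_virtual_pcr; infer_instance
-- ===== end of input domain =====

-- B finds sites from one per-position difference vector per window (no window slicing) and
-- replaces A's full fwd×rev nested pairing scan by counting, per fwd site, how many of the
-- strictly increasing rev-site ends are admissible, then emitting one contiguous slice.

-- ===== PORT A =====
-- internal binding-site record (Python uses a dict with mixed value types)
structure PvSite where
  start : Int
  stop : Int
  mism : Int
  p3 : Int
  seq : String
deriving Repr, DecidableEq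

def pvComplement : PySem.Dict Char Char :=
  PySem.Dict.mk [('A','T'),('T','A'),('G','C'),('C','G'),('N','N'),('R','Y'),('Y','R'),
                 ('S','S'),('W','W'),('K','M'),('M','K'),('B','V'),('V','B'),('D','H'),('H','D')]

-- sum(1 for a, b in zip(w, s) if a != b)
def pvMismCount (w s : List Char) : Int :=
  ((w.zip s).countP (fun ab => ab.1 != ab.2) : Int)

def reverse_complement (seq : String) : String :=
  String.ofList (((PySem.Str.upper seq).toList.reverse).map (fun b => pvComplement.getD b 'N'))

def find_binding_sites (template search : String) (max_mismatches : Int) (is_reverse : Bool) : List PvSite :=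
  let tl := PySem.Str.len template
  let pl := PySem.Str.len search
  if tl = 0 ∨ pl = 0 ∨ tl < pl then []
  else
    let s := (PySem.Str.upper search).toList
    let tu := (PySem.Str.upper template).toList
    (PySem.List.pyRange 0 (tl - pl + 1) 1).foldl (fun sites i =>
      let window := PySem.List.slice tu (some i) (some (i + pl))
      let mism := pvMismCount window s
      if mism ≤ max_mismatches then
        let endmm :=
          if !is_reverse then
            pvMismCount (PySem.List.slice window (some (-5)) none) (PySem.List.slice s (some (-5)) none)
          else
            pvMismCount (PySem.List.slice window none (some 5)) (PySem.List.slice s none (some 5))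
        sites ++ [⟨i + 1, i + pl, mism, endmm, String.ofList window⟩]
      else sites) []

-- the product dict literal (all-Int values, distinct keys, insertion order)
def pvMkProduct (f r : PvSite) : List (String × Int) :=
  [("fwd_start", f.start), ("fwd_end", f.stop), ("rev_start", r.start), ("rev_end", r.stop),
   ("size", r.stop - f.start + 1), ("fwd_mismatches", f.mism), ("rev_mismatches", r.mism),
   ("fwd_3prime_mm", f.p3), ("rev_3prime_mm", r.p3)]

-- key=lambda x: x["size"]  (shared: both Pythons sort with this lambda)
def pvSizeKey (d : List (String × Int)) : Int := (PySem.Dict.mk d).getD "size" 0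

def run_virtual_pcr (template : String) (fwd : String) (rev : String) (max_mismatches : Int) (max_product : Int) : List (List (String × Int)) :=
  let template := PySem.Str.upper template
  let rev_comp := reverse_complement rev
  let fwd_sites := find_binding_sites template fwd max_mismatches false
  let rev_sites := find_binding_sites template rev_comp max_mismatches true
  let products := fwd_sites.foldl (fun acc f =>
    rev_sites.foldl (fun acc r =>
      if f.start < r.stop then
        let size := r.stop - f.start + 1
        if size ≤ max_product then acc ++ [pvMkProduct f r] else acc
      else acc) acc) []
  PySem.List.sorted products pvSizeKey false

-- ===== PORT B =====
def reverse_complement_alt (seq : String) : String :=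
  String.ofList (((PySem.Str.upper seq).toList.map (fun b => pvComplement.getD b 'N')).reverse)

-- B's sites: tuples (start, end, mismatches, 3'-mismatches), built from the diff vector
def pvSitesB (template primer : String) (max_mismatches : Int) (is_reverse : Bool) :
    List (Int × Int × Int × Int) :=
  let t := (PySem.Str.upper template).toList
  let p := (PySem.Str.upper primer).toList
  let m : Int := (p.length : Int)
  if m = 0 ∨ (t.length : Int) < m then []
  else
    (PySem.List.pyRange 0 ((t.length : Int) - m + 1) 1).foldl (fun out i =>
      -- diffs = [t[i+j] != p[j] for j in range(m)]; sum of a bool list counts its Trues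
      let diffs := (PySem.List.pyRange 0 m 1).map
        (fun j => PySem.List.pyGetD t (i + j) ' ' != PySem.List.pyGetD p j ' ')
      let d : Int := (diffs.countP id : Int)
      if d ≤ max_mismatches then
        let e : Int :=
          if is_reverse then ((PySem.List.slice diffs none (some 5)).countP id : Int)
          else ((PySem.List.slice diffs (some (-5)) none).countP id : Int)
        out ++ [(i + 1, i + m, d, e)]
      else out) []

def pvProductB (fb rb : Int × Int × Int × Int) : List (String × Int) :=
  [("fwd_start", fb.1), ("fwd_end", fb.2.1), ("rev_start", rb.1), ("rev_end", rb.2.1),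
   ("size", rb.2.1 - fb.1 + 1), ("fwd_mismatches", fb.2.2.1), ("rev_mismatches", rb.2.2.1),
   ("fwd_3prime_mm", fb.2.2.2), ("rev_3prime_mm", rb.2.2.2)]

def run_virtual_pcr_alt (template : String) (fwd : String) (rev : String) (max_mismatches : Int) (max_product : Int) : List (List (String × Int)) :=
  let template := PySem.Str.upper template
  let fwd_sites := pvSitesB template fwd max_mismatches false
  let rev_sites := pvSitesB template (reverse_complement_alt rev) max_mismatches true
  let ends := rev_sites.map (fun rb => rb.2.1)
  let products := fwd_sites.foldl (fun acc fb =>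
    let lo : Int := ((ends.countP (fun e => decide (e ≤ fb.1))) : Int)
    let hi : Int := ((ends.countP (fun e => decide (e ≤ fb.1 + max_product - 1))) : Int)
    (PySem.List.slice rev_sites (some lo) (some hi)).foldl
      (fun acc rb => acc ++ [pvProductB fb rb]) acc) []
  PySem.List.sorted products pvSizeKey false

-- ===== PRECONDITION & SPEC =====
def Spec_run_virtual_pcr (template : String) (fwd : String) (rev : String) (max_mismatches : Int) (max_product : Int) (out : List (List (String × Int))) : Prop := out = run_virtual_pcr_alt template fwd rev max_mismatches max_product
instance (template : String) (fwd : String) (rev : String) (max_mismatches : Int) (max_product : Int) (out : List (List (String × Int))) : Decidable (Spec_run_virtual_pcr template fwd rev max_mismatches max_product out) := by unfold Spec_run_virtual_pcr; infer_instance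

-- ===== CLAIM (what is proved, stated in full; the proofs are below) =====
def Claim_equal_run_virtual_pcr : Prop := ∀ (template : String) (fwd : String) (rev : String) (max_mismatches : Int) (max_product : Int), Dom_run_virtual_pcr template fwd rev max_mismatches max_product → Spec_run_virtual_pcr template fwd rev max_mismatches max_product (run_virtual_pcr template fwd rev max_mismatches max_product)

-- ===== LEMMAS AND PROOFS =====

def pvProj (x : PvSite) : Int × Int × Int × Int := (x.start, x.stop, x.mism, x.p3)

-- strictly-increasing key ⇒ the two-sided window filter is a contiguous drop/take
theorem filter_window {α : Type} (key : α → Int) (a mp : Int) :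
    ∀ (rs : List α), rs.Pairwise (fun x y => key x < key y) →
    rs.filter (fun r => decide (a < key r) && decide (key r - a + 1 ≤ mp))
    = (rs.drop (rs.takeWhile (fun r => decide (key r ≤ a))).length).take
        ((rs.takeWhile (fun r => decide (key r ≤ a + mp - 1))).length
         - (rs.takeWhile (fun r => decide (key r ≤ a))).length) := by
  intro rs
  induction rs with
  | nil => simp
  | cons x t ih =>
    intro hp
    have hx : ∀ y ∈ t, key x < key y := fun y hy => (List.pairwise_cons.mp hp).1 y hy
    have ht := (List.pairwise_cons.mp hp).2
    by_cases hpx : key x ≤ a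
    · by_cases hqx : key x ≤ a + mp - 1
      · simp only [List.filter_cons, List.takeWhile_cons]
        simp only [hpx, hqx, decide_true, if_pos, List.length_cons]
        have : ¬ (a < key x) := by omega
        simp only [this, decide_false, Bool.false_and, Nat.succ_sub_succ]
        exact ih ht
      · -- mp too small: nothing qualifies at all
        have hfilt : (x :: t).filter (fun r => decide (a < key r) && decide (key r - a + 1 ≤ mp)) = [] := by
          rw [List.filter_eq_nil_iff]
          intro y hy
          rcases List.mem_cons.mp hy with rfl | hyt
          · simp; omega
          · have := hx y hyt; simp; omega
        rw [hfilt]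
        simp only [List.takeWhile_cons]
        simp [hpx, hqx]
    · -- a < key x : the ≤a-takeWhile is empty here and on t
      have hLt : t.takeWhile (fun r => decide (key r ≤ a)) = [] := by
        cases t with
        | nil => rfl
        | cons y ys =>
          have : ¬ (key y ≤ a) := by have := hx y (List.mem_cons_self); omega
          simp [List.takeWhile, this]
      by_cases hqx : key x ≤ a + mp - 1
      · have hfx : List.filter (fun r => decide (a < key r) && decide (key r - a + 1 ≤ mp)) (x :: t)
            = x :: List.filter (fun r => decide (a < key r) && decide (key r - a + 1 ≤ mp)) t := by
          rw [List.filter_cons, if_pos (by simp; omega)]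
        have htw1 : List.takeWhile (fun r => decide (key r ≤ a)) (x :: t) = [] := by
          rw [List.takeWhile_cons, if_neg (by simp; omega)]
        have htw2 : List.takeWhile (fun r => decide (key r ≤ a + mp - 1)) (x :: t)
            = x :: List.takeWhile (fun r => decide (key r ≤ a + mp - 1)) t := by
          rw [List.takeWhile_cons, if_pos (by simp; omega)]
        rw [hfx, htw1, htw2]
        simp only [List.length_nil, List.length_cons, List.drop_zero, Nat.sub_zero,
          List.take_succ_cons]
        have := ih ht
        rw [hLt] at this
        simp only [List.length_nil, List.drop_zero, Nat.sub_zero] at this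
        rw [this]
      · -- upper bound already fails at x, hence (sorted) on all of t
        have hfilt : (x :: t).filter (fun r => decide (a < key r) && decide (key r - a + 1 ≤ mp)) = [] := by
          rw [List.filter_eq_nil_iff]
          intro y hy
          rcases List.mem_cons.mp hy with rfl | hyt
          · simp; omega
          · have := hx y hyt; simp; omega
        rw [hfilt]
        simp only [List.takeWhile_cons]
        simp [hpx, hqx]

-- on a strictly increasing list a downward-closed count is a prefix length
theorem countP_tw (p : Int → Bool) (hd : ∀ x y : Int, x ≤ y → p y = true → p x = true) :
    ∀ (l : List Int), l.Pairwise (· < ·) → l.countP p = (l.takeWhile p).length := by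
  intro l
  induction l with
  | nil => simp
  | cons x t ih =>
    intro hp
    have hx : ∀ y ∈ t, x < y := fun y hy => (List.pairwise_cons.mp hp).1 y hy
    have ht := (List.pairwise_cons.mp hp).2
    by_cases hpx : p x = true
    · simp only [List.countP_cons, List.takeWhile_cons, hpx, if_pos, List.length_cons]
      rw [ih ht]
    · have h0 : t.countP p = 0 := by
        rw [List.countP_eq_zero]
        intro y hy hpy
        exact hpx (hd x y (le_of_lt (hx y hy)) hpy)
      simp [hpx, h0]

theorem rc_alt_eq (seq : String) : reverse_complement_alt seq = reverse_complement seq := by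
  simp [reverse_complement, reverse_complement_alt, List.map_reverse]

-- the site built by A at window offset i (zeta-reduced body of the fbs loop)
def pvSiteOf (tu su : List Char) (pl : Int) (is_reverse : Bool) (i : Int) : PvSite :=
  let window := PySem.List.slice tu (some i) (some (i + pl))
  ⟨i + 1, i + pl, pvMismCount window su,
    if !is_reverse then
      pvMismCount (PySem.List.slice window (some (-5)) none) (PySem.List.slice su (some (-5)) none)
    else
      pvMismCount (PySem.List.slice window none (some 5)) (PySem.List.slice su none (some 5)),
    String.ofList window⟩

theorem fbs_char (t s : String) (mm : Int) (rev : Bool)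
    (h : ¬(PySem.Str.len t = 0 ∨ PySem.Str.len s = 0 ∨ PySem.Str.len t < PySem.Str.len s)) :
    find_binding_sites t s mm rev =
      ((PySem.List.pyRange 0 (PySem.Str.len t - PySem.Str.len s + 1) 1).filter
          (fun i => decide (pvMismCount (PySem.List.slice (PySem.Str.upper t).toList (some i) (some (i + PySem.Str.len s))) (PySem.Str.upper s).toList ≤ mm))).map
        (pvSiteOf (PySem.Str.upper t).toList (PySem.Str.upper s).toList (PySem.Str.len s) rev) := by
  unfold find_binding_sites
  rw [if_neg h]
  exact (PySem.List.foldl_append_ite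
    (p := fun i => pvMismCount (PySem.List.slice (PySem.Str.upper t).toList (some i) (some (i + PySem.Str.len s))) (PySem.Str.upper s).toList ≤ mm)
    (f := pvSiteOf (PySem.Str.upper t).toList (PySem.Str.upper s).toList (PySem.Str.len s) rev)
    _ []).trans (List.nil_append _)

theorem fbs_pairwise (t s : String) (mm : Int) (rev : Bool) :
    (find_binding_sites t s mm rev).Pairwise (fun x y => x.stop < y.stop) := by
  by_cases h : (PySem.Str.len t = 0 ∨ PySem.Str.len s = 0 ∨ PySem.Str.len t < PySem.Str.len s)
  · unfold find_binding_sites; rw [if_pos h]; exact List.Pairwise.nil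
  · rw [fbs_char t s mm rev h]
    apply List.pairwise_map.mpr
    apply List.Pairwise.filter
    apply (PySem.List.pairwise_lt_pyRange_one 0 _).imp
    intro i j hij
    simp only [pvSiteOf]
    omega

-- the tuple built by B at window offset i (zeta-reduced body of B's loop)
def pvTupOf (tu su : List Char) (m : Int) (is_reverse : Bool) (i : Int) : Int × Int × Int × Int :=
  let diffs := (PySem.List.pyRange 0 m 1).map
    (fun j => PySem.List.pyGetD tu (i + j) ' ' != PySem.List.pyGetD su j ' ')
  (i + 1, i + m, (diffs.countP id : Int),
    if is_reverse then ((PySem.List.slice diffs none (some 5)).countP id : Int)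
    else ((PySem.List.slice diffs (some (-5)) none).countP id : Int))

def pvDiffB (tu su : List Char) (i : Int) : Int :=
  ((PySem.List.pyRange 0 ((su.length : Int)) 1).map
    (fun j => PySem.List.pyGetD tu (i + j) ' ' != PySem.List.pyGetD su j ' ')).countP id

theorem sitesB_char (t s : String) (mm : Int) (rev : Bool)
    (h : ¬((((PySem.Str.upper s).toList.length : Int)) = 0 ∨
           (((PySem.Str.upper t).toList.length : Int)) < ((PySem.Str.upper s).toList.length : Int))) :
    pvSitesB t s mm rev =
      ((PySem.List.pyRange 0 (((PySem.Str.upper t).toList.length : Int) - ((PySem.Str.upper s).toList.length : Int) + 1) 1).filter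
          (fun i => decide (pvDiffB (PySem.Str.upper t).toList (PySem.Str.upper s).toList i ≤ mm))).map
        (pvTupOf (PySem.Str.upper t).toList (PySem.Str.upper s).toList ((PySem.Str.upper s).toList.length : Int) rev) := by
  unfold pvSitesB
  rw [if_neg h]
  exact (PySem.List.foldl_append_ite
    (p := fun i => pvDiffB (PySem.Str.upper t).toList (PySem.Str.upper s).toList i ≤ mm)
    (f := pvTupOf (PySem.Str.upper t).toList (PySem.Str.upper s).toList ((PySem.Str.upper s).toList.length : Int) rev)
    _ []).trans (List.nil_append _)

-- the window is a concrete drop/take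
theorem win_eq (tu su : List Char) (i : Int) (h0 : 0 ≤ i) :
    PySem.List.slice tu (some i) (some (i + (su.length : Int)))
      = (tu.drop i.toNat).take su.length := by
  rw [PySem.List.slice_toNat tu h0 (by omega)]
  congr 1
  omega

theorem win_len (tu su : List Char) (i : Int)
    (hm : i.toNat + su.length ≤ tu.length) :
    ((tu.drop i.toNat).take su.length).length = su.length := by
  simp
  omega

-- B's index-based diff vector is A's zip over the window
theorem diffs_eq (tu su : List Char) (i : Int) (h0 : 0 ≤ i)
    (hm : i.toNat + su.length ≤ tu.length) :
    (PySem.List.pyRange 0 ((su.length : Int)) 1).map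
      (fun j => PySem.List.pyGetD tu (i + j) ' ' != PySem.List.pyGetD su j ' ')
    = (((tu.drop i.toNat).take su.length).zip su).map (fun ab => ab.1 != ab.2) := by
  apply List.ext_getElem
  · simp [PySem.List.length_pyRange_one]
    omega
  · intro k hk1 hk2
    have hkm : k < su.length := by
      simp only [List.length_map, PySem.List.length_pyRange_one] at hk1
      omega
    have hik : i.toNat + k < tu.length := by omega
    simp only [List.getElem_map, PySem.List.getElem_pyRange_one, List.getElem_zip,
      List.getElem_take, List.getElem_drop]
    have e1 : PySem.List.pyGetD tu (i + (0 + (k : Int))) ' ' = tu[i.toNat + k] := by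
      rw [PySem.List.pyGetD_eq_getElem tu ' ' (by omega) (by omega)]
      congr 1
      omega
    have e2 : PySem.List.pyGetD su (0 + (k : Int)) ' ' = su[k] := by
      rw [show ((0 : Int) + (k : Int)) = ((k : Nat) : Int) by omega, PySem.List.pyGetD_natCast]
      exact List.getD_eq_getElem su ' ' hkm
    rw [e1, e2]

-- count of Trues in a zipped diff prefix/suffix is the mismatch count of the parts
theorem count_drop (W su : List Char) (n : Nat) :
    ((((W.zip su).map (fun ab => ab.1 != ab.2)).drop n).countP id : Int)
      = pvMismCount (W.drop n) (su.drop n) := by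
  unfold pvMismCount
  rw [← List.map_drop, List.countP_map]
  have hz : List.drop n (W.zip su) = (W.drop n).zip (su.drop n) := by
    simp [List.zip_eq_zipWith, List.drop_zipWith]
  have hc : ((fun b : Bool => b) ∘ fun ab : Char × Char => ab.1 != ab.2)
      = (fun ab : Char × Char => ab.1 != ab.2) := by funext ab; rfl
  rw [hz]
  norm_cast

theorem count_take (W su : List Char) (n : Nat) :
    ((((W.zip su).map (fun ab => ab.1 != ab.2)).take n).countP id : Int)
      = pvMismCount (W.take n) (su.take n) := by
  unfold pvMismCount
  rw [← List.map_take, List.countP_map]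
  have hz : List.take n (W.zip su) = (W.take n).zip (su.take n) := by
    simp [List.zip_eq_zipWith, List.take_zipWith]
  rw [hz]
  norm_cast

theorem diffB_eq (tu su : List Char) (i : Int) (h0 : 0 ≤ i)
    (hm : i.toNat + su.length ≤ tu.length) :
    pvDiffB tu su i
      = pvMismCount (PySem.List.slice tu (some i) (some (i + (su.length : Int)))) su := by
  unfold pvDiffB pvMismCount
  rw [diffs_eq tu su i h0 hm, List.countP_map, win_eq tu su i h0]
  congr 1

-- B's tuple is the projection of A's site, mismatch counts included
theorem tup_eq_proj (tu su : List Char) (rev : Bool) (i : Int) (h0 : 0 ≤ i)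
    (hm : i.toNat + su.length ≤ tu.length) :
    pvTupOf tu su ((su.length : Int)) rev i = pvProj (pvSiteOf tu su ((su.length : Int)) rev i) := by
  unfold pvTupOf pvSiteOf pvProj
  simp only [diffs_eq tu su i h0 hm, win_eq tu su i h0]
  refine Prod.ext rfl (Prod.ext rfl (Prod.ext ?_ ?_))
  · show ((((((tu.drop i.toNat).take su.length).zip su).map (fun ab => ab.1 != ab.2)).countP id : Nat) : Int)
      = pvMismCount ((tu.drop i.toNat).take su.length) su
    unfold pvMismCount
    rw [List.countP_map]
    congr 1
  · show _ = (if !rev then _ else _)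
    cases rev with
    | false =>
      simp only [Bool.not_false, Bool.false_eq_true, if_true, if_false]
      rw [PySem.List.slice_from_neg_ofNat _ 5 (by omega), PySem.List.slice_from_neg_ofNat _ 5 (by omega),
        PySem.List.slice_from_neg_ofNat _ 5 (by omega)]
      rw [List.length_map, List.length_zip, win_len tu su i hm, min_self]
      rw [count_drop]
    | true =>
      simp only [Bool.not_true, Bool.false_eq_true, if_false, if_true]
      rw [PySem.List.slice_to _ (by omega), PySem.List.slice_to _ (by omega),
        PySem.List.slice_to _ (by omega)]
      rw [show ((5 : Int)).toNat = 5 by rfl]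
      rw [count_take]

theorem sitesB_eq (t s : String) (mm : Int) (rev : Bool) :
    pvSitesB t s mm rev = (find_binding_sites t s mm rev).map pvProj := by
  have hlt : (PySem.Str.upper t).toList.length = t.toList.length := by
    rw [PySem.Str.toList_upper]; simp [PySem.Chars.upper]
  have hls : (PySem.Str.upper s).toList.length = s.toList.length := by
    rw [PySem.Str.toList_upper]; simp [PySem.Chars.upper]
  have hAt : PySem.Str.len t = (((PySem.Str.upper t).toList.length : Nat) : Int) := by
    rw [PySem.Str.len_eq, hlt]
  have hAs : PySem.Str.len s = (((PySem.Str.upper s).toList.length : Nat) : Int) := by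
    rw [PySem.Str.len_eq, hls]
  by_cases h : (PySem.Str.len t = 0 ∨ PySem.Str.len s = 0 ∨ PySem.Str.len t < PySem.Str.len s)
  · have hB : (((PySem.Str.upper s).toList.length : Nat) : Int) = 0 ∨
        (((PySem.Str.upper t).toList.length : Nat) : Int) < ((PySem.Str.upper s).toList.length : Nat) := by
      rw [hAt, hAs] at h
      omega
    unfold pvSitesB find_binding_sites
    rw [if_pos h, if_pos hB]
    rfl
  · have hB : ¬((((PySem.Str.upper s).toList.length : Nat) : Int) = 0 ∨
        (((PySem.Str.upper t).toList.length : Nat) : Int) < ((PySem.Str.upper s).toList.length : Nat)) := by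
      rw [hAt, hAs] at h
      omega
    rw [fbs_char t s mm rev h, sitesB_char t s mm rev hB, List.map_map, hAt, hAs]
    have hfil : ∀ i ∈ PySem.List.pyRange 0 ((((PySem.Str.upper t).toList.length : Nat) : Int) - (((PySem.Str.upper s).toList.length : Nat) : Int) + 1) 1,
        (decide (pvDiffB (PySem.Str.upper t).toList (PySem.Str.upper s).toList i ≤ mm))
        = (decide (pvMismCount (PySem.List.slice (PySem.Str.upper t).toList (some i) (some (i + (((PySem.Str.upper s).toList.length : Nat) : Int)))) (PySem.Str.upper s).toList ≤ mm)) := by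
      intro i hi
      rw [PySem.List.mem_pyRange_one] at hi
      have hb : ¬((((PySem.Str.upper s).toList.length : Nat) : Int) = 0) ∧
          (((PySem.Str.upper s).toList.length : Nat) : Int) ≤ ((PySem.Str.upper t).toList.length : Nat) := by
        constructor <;> omega
      rw [diffB_eq _ _ i hi.1 (by omega)]
    rw [List.filter_congr hfil]
    apply List.map_congr_left
    intro i hi
    have hi2 := List.mem_of_mem_filter hi
    rw [PySem.List.mem_pyRange_one] at hi2
    have hb2 : ¬((((PySem.Str.upper s).toList.length : Nat) : Int) = 0) := by omega
    exact tup_eq_proj (PySem.Str.upper t).toList (PySem.Str.upper s).toList rev i hi2.1 (by omega)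

-- A's inner loop over rev sites is an append of the filtered pair list
theorem inner_eq (f : PvSite) (mp : Int) (rs : List PvSite) (acc : List (List (String × Int))) :
    rs.foldl (fun acc r =>
        if f.start < r.stop then
          if r.stop - f.start + 1 ≤ mp then acc ++ [pvMkProduct f r] else acc
        else acc) acc
    = acc ++ (rs.filter (fun r => decide (f.start < r.stop) && decide (r.stop - f.start + 1 ≤ mp))).map
        (pvMkProduct f) := by
  induction rs generalizing acc with
  | nil => simp
  | cons r rt ih =>
    simp only [List.foldl_cons, List.filter_cons]
    by_cases h1 : f.start < r.stop
    · by_cases h2 : r.stop - f.start + 1 ≤ mp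
      · rw [if_pos h1]
        show List.foldl _ (if r.stop - f.start + 1 ≤ mp then acc ++ [pvMkProduct f r] else acc) rt = _
        rw [if_pos h2, ih]
        have hc : (decide (f.start < r.stop) && decide (r.stop - f.start + 1 ≤ mp)) = true := by
          simp only [Bool.and_eq_true, decide_eq_true_eq]; exact ⟨h1, h2⟩
        rw [hc, if_pos rfl]
        simp
      · rw [if_pos h1]
        show List.foldl _ (if r.stop - f.start + 1 ≤ mp then acc ++ [pvMkProduct f r] else acc) rt = _
        rw [if_neg h2, ih]
        have hc : (decide (f.start < r.stop) && decide (r.stop - f.start + 1 ≤ mp)) = false := by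
          simp [h2]
        rw [hc, if_neg (by simp)]
    · rw [if_neg h1, ih]
      have hc : (decide (f.start < r.stop) && decide (r.stop - f.start + 1 ≤ mp)) = false := by
        simp [h1]
      rw [hc, if_neg (by simp)]

-- counting admissible ends locates exactly A's filtered window
theorem slice_counts (rsA : List PvSite) (mp : Int)
    (hrs : rsA.Pairwise (fun x y => x.stop < y.stop)) (f : PvSite) :
    PySem.List.slice (rsA.map pvProj)
      (some ((((rsA.map pvProj).map (fun rb => rb.2.1)).countP (fun e => decide (e ≤ f.start)) : Nat) : Int))
      (some ((((rsA.map pvProj).map (fun rb => rb.2.1)).countP (fun e => decide (e ≤ f.start + mp - 1)) : Nat) : Int))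
    = (rsA.filter (fun r => decide (f.start < r.stop) && decide (r.stop - f.start + 1 ≤ mp))).map pvProj := by
  have hproj : (rsA.map pvProj).map (fun rb => rb.2.1) = rsA.map (fun r => r.stop) := by
    rw [List.map_map]; rfl
  have hends : (rsA.map (fun r => r.stop)).Pairwise (· < ·) := List.pairwise_map.mpr hrs
  have h1 : ((rsA.map pvProj).map (fun rb => rb.2.1)).countP (fun e => decide (e ≤ f.start))
      = (rsA.takeWhile (fun r => decide (r.stop ≤ f.start))).length := by
    rw [hproj, countP_tw _ (fun x y hxy hy => by simp only [decide_eq_true_eq] at *; omega) _ hends,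
      List.takeWhile_map]
    simp only [List.length_map]
    rfl
  have h2 : ((rsA.map pvProj).map (fun rb => rb.2.1)).countP (fun e => decide (e ≤ f.start + mp - 1))
      = (rsA.takeWhile (fun r => decide (r.stop ≤ f.start + mp - 1))).length := by
    rw [hproj, countP_tw _ (fun x y hxy hy => by simp only [decide_eq_true_eq] at *; omega) _ hends,
      List.takeWhile_map]
    simp only [List.length_map]
    rfl
  rw [h1, h2, PySem.List.slice_natCast, filter_window PvSite.stop f.start mp rsA hrs,
    List.map_take, List.map_drop]

-- B's counting pass builds exactly A's nested-scan product list
theorem pairing_eq (rsA : List PvSite) (mp : Int)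
    (hrs : rsA.Pairwise (fun x y => x.stop < y.stop)) :
    ∀ (fsA : List PvSite) (acc : List (List (String × Int))),
    (fsA.map pvProj).foldl (fun acc fb =>
        let lo : Int := (((rsA.map pvProj).map (fun rb => rb.2.1)).countP (fun e => decide (e ≤ fb.1)) : Int)
        let hi : Int := (((rsA.map pvProj).map (fun rb => rb.2.1)).countP (fun e => decide (e ≤ fb.1 + mp - 1)) : Int)
        (PySem.List.slice (rsA.map pvProj) (some lo) (some hi)).foldl
          (fun acc rb => acc ++ [pvProductB fb rb]) acc) acc
    = fsA.foldl (fun acc f =>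
        rsA.foldl (fun acc r =>
          if f.start < r.stop then
            let size := r.stop - f.start + 1
            if size ≤ mp then acc ++ [pvMkProduct f r] else acc
          else acc) acc) acc := by
  intro fsA
  induction fsA with
  | nil => intro acc; rfl
  | cons f ft ih =>
    intro acc
    simp only [List.map_cons, List.foldl_cons]
    rw [show ((pvProj f).1 : Int) = f.start from rfl]
    rw [PySem.List.foldl_append_singleton_eq_map, slice_counts rsA mp hrs f, inner_eq f mp rsA acc]
    have hacc : List.map (pvProductB (pvProj f)) (List.map pvProj
          (rsA.filter (fun r => decide (f.start < r.stop) && decide (r.stop - f.start + 1 ≤ mp))))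
        = List.map (pvMkProduct f)
          (rsA.filter (fun r => decide (f.start < r.stop) && decide (r.stop - f.start + 1 ≤ mp))) := by
      rw [List.map_map]
      rfl
    rw [hacc]
    exact ih _

-- ===== VERDICT (by name: the statement is the Claim_ definition above) =====
theorem run_virtual_pcr_spec : Claim_equal_run_virtual_pcr := by
  unfold Claim_equal_run_virtual_pcr
  intro template fwd rev mm mp _
  unfold Spec_run_virtual_pcr
  simp only [run_virtual_pcr, run_virtual_pcr_alt, rc_alt_eq, sitesB_eq]
  exact (congrArg (fun z => PySem.List.sorted z pvSizeKey false)
    (pairing_eq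
      (find_binding_sites (PySem.Str.upper template) (reverse_complement rev) mm true) mp
      (fbs_pairwise _ _ _ _)
      (find_binding_sites (PySem.Str.upper template) fwd mm false)
      [])).symm
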